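-- pv_equiv track=rewrite | github.com/kehuo/algorithm_py3 | lc/2020/August_02_case_200/4.py | cal_common_points
-- ===== SOURCE A (Python) =====
-- def cal_common_points(nums1, nums2):
--     """
--     计算2个数组所有的共同点
--     nums1 = [2,4,5,8,10], nums2 = [4,6,8,9]
--
--     res = [(value, nums1_idx, nums2_idx)]
--     res = [(4, 1, 0), (8, 3, 2)]
--     """
--     res = []
--     len_1, len_2 = len(nums1), len(nums2)
--     for i in range(len_1):
--         c1 = nums1[i]
--         for j in range(len_2):
--             c2 = nums2[j]
--             if c1 == c2:
--                 tmp = (c1, i, j)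
--                 res.append(tmp)
--     return res
-- ===== SOURCE B (Python) =====
-- def cal_common_points(nums1, nums2):
--     idx = {}
--     for j, v in enumerate(nums2):
--         idx.setdefault(v, []).append(j)
--     res = []
--     for i, v in enumerate(nums1):
--         for j in idx.get(v, []):
--             res.append((v, i, j))
--     return res
-- ===== Notes on version B (the rewrite author's own statement) =====
-- stated objective: alternative
-- what changed: Replaces the nested scan of nums2 for every element of nums1 by a dict built once mapping each value of nums2 to its ascending index list, then a single pass over nums1 (intended as faster; measured 1.54x at n=1024, unconfirmed at the largest size where the output itself is quadratic).
import Mathlib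
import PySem

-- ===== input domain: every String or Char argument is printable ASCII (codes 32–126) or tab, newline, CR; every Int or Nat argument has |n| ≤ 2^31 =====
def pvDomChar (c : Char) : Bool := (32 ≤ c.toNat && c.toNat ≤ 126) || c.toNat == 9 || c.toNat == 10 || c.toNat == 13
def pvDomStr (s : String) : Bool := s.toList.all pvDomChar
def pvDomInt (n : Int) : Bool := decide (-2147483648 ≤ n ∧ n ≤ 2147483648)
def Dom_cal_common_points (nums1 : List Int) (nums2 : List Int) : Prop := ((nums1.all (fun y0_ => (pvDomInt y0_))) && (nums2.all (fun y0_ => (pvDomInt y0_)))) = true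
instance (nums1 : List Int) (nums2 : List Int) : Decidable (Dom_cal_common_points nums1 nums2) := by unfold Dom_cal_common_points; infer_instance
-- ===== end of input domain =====

-- B builds a value→index-list dict from nums2 once and scans nums1 once, replacing A's nested scan (alternative algorithm; same return value).


-- ===== PORT A =====
-- nested index loops; tuples (c1, i, j) are ported as 3-element lists
def cal_common_points (nums1 : List Int) (nums2 : List Int) : List (List Int) :=
  let len1 := PySem.List.len nums1
  let len2 := PySem.List.len nums2
  (PySem.List.pyRange 0 len1).foldl (fun res i =>
    let c1 := PySem.List.pyGetD nums1 i 0   -- i produced by range(len) is always in range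
    (PySem.List.pyRange 0 len2).foldl (fun res j =>
      let c2 := PySem.List.pyGetD nums2 j 0
      if c1 = c2 then res ++ [[c1, i, j]] else res) res) []

-- ===== PORT B =====
-- idx.setdefault(v, []).append(j) == idx[v] = idx.get(v, []) + [j], i.e. Dict.modify
def cal_common_points_alt (nums1 : List Int) (nums2 : List Int) : List (List Int) :=
  let idx := (PySem.List.enumerate nums2).foldl
      (fun d p => d.modify p.2 ([] : List Int) (fun l => l ++ [p.1])) PySem.Dict.empty
  (PySem.List.enumerate nums1).foldl
    (fun res p => (idx.getD p.2 []).foldl (fun res j => res ++ [[p.2, p.1, j]]) res) []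

-- ===== PRECONDITION & SPEC =====
def Spec_cal_common_points (nums1 : List Int) (nums2 : List Int) (out : List (List Int)) : Prop := out = cal_common_points_alt nums1 nums2
instance (nums1 : List Int) (nums2 : List Int) (out : List (List Int)) : Decidable (Spec_cal_common_points nums1 nums2 out) := by unfold Spec_cal_common_points; infer_instance

-- ===== CLAIM (what is proved, stated in full; the proofs are below) =====
def Claim_equal_cal_common_points : Prop := ∀ (nums1 : List Int) (nums2 : List Int), Dom_cal_common_points nums1 nums2 → Spec_cal_common_points nums1 nums2 (cal_common_points nums1 nums2)

-- ===== LEMMAS AND PROOFS =====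

-- the matches produced for one element c1 of nums1 at index i, in nums2 order
def pvMatches (nums2 : List Int) (i c1 : Int) : List (List Int) :=
  ((PySem.List.enumerate nums2).filter (fun p => p.2 == c1)).map (fun p => [c1, i, p.1])

-- A's inner loop appends exactly pvMatches
lemma innerA_eq (nums2 : List Int) (i c1 : Int) (res : List (List Int)) :
    (PySem.List.pyRange 0 (PySem.List.len nums2)).foldl (fun res j =>
      if c1 = PySem.List.pyGetD nums2 j 0 then res ++ [[c1, i, j]] else res) res
    = res ++ pvMatches nums2 i c1 := by
  have h : (PySem.List.pyRange 0 (PySem.List.len nums2)).foldl (fun res j =>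
      if c1 = PySem.List.pyGetD nums2 j 0 then res ++ [[c1, i, j]] else res) res
      = (PySem.List.enumerate nums2).foldl (fun res p =>
          if c1 = p.2 then res ++ [[c1, i, p.1]] else res) res := by
    rw [PySem.List.enumerate_eq_map_pyRange nums2 (0 : Int), List.foldl_map]
  rw [h]
  refine (PySem.List.foldl_append_ite (fun p : Int × Int => c1 = p.2)
    (fun p => [c1, i, p.1]) _ res).trans ?_
  unfold pvMatches
  congr 1
  congr 1
  apply List.filter_congr
  intro p _
  by_cases hc : c1 = p.2
  · subst hc; simp
  · have h2 : p.2 ≠ c1 := fun e => hc e.symm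
    simp [hc, h2]

-- B's dict lookup returns the ascending index list of c1 in nums2
lemma idx_getD (nums2 : List Int) (c1 : Int) :
    ((PySem.List.enumerate nums2).foldl
        (fun d p => d.modify p.2 ([] : List Int) (fun l => l ++ [p.1])) PySem.Dict.empty).getD c1 []
    = ((PySem.List.enumerate nums2).filter (fun p => p.2 == c1)).map (fun p => p.1) := by
  have h : (PySem.List.enumerate nums2).foldl
      (fun d p => d.modify p.2 ([] : List Int) (fun l => l ++ [p.1])) PySem.Dict.empty
      = ((PySem.List.enumerate nums2).map Prod.swap).foldl
          (fun d p => d.modify p.1 ([] : List Int) (fun l => l ++ [p.2])) PySem.Dict.empty := by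
    rw [List.foldl_map]
    simp only [Prod.fst_swap, Prod.snd_swap]
  rw [h, PySem.Dict.getD_foldl_modify_append, PySem.Dict.getD_empty]
  simp [List.filter_map, List.map_map, Function.comp_def, Prod.swap]

-- B's inner loop appends exactly pvMatches too
lemma innerB_eq (nums2 : List Int) (i c1 : Int) (res : List (List Int)) :
    (((PySem.List.enumerate nums2).foldl
        (fun d p => d.modify p.2 ([] : List Int) (fun l => l ++ [p.1])) PySem.Dict.empty).getD c1 []).foldl
      (fun res j => res ++ [[c1, i, j]]) res
    = res ++ pvMatches nums2 i c1 := by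
  rw [idx_getD, PySem.List.foldl_append_singleton_eq_map]
  unfold pvMatches
  rw [List.map_map]
  simp [Function.comp_def]

-- ===== VERDICT (by name: the statement is the Claim_ definition above) =====
theorem cal_common_points_spec : Claim_equal_cal_common_points := by
  unfold Claim_equal_cal_common_points Spec_cal_common_points
  intro nums1 nums2 _
  show cal_common_points nums1 nums2 = cal_common_points_alt nums1 nums2
  unfold cal_common_points cal_common_points_alt
  simp only []
  have hA : (PySem.List.pyRange 0 (PySem.List.len nums1)).foldl (fun res i =>
      (PySem.List.pyRange 0 (PySem.List.len nums2)).foldl (fun res j =>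
        if PySem.List.pyGetD nums1 i 0 = PySem.List.pyGetD nums2 j 0 then
          res ++ [[PySem.List.pyGetD nums1 i 0, i, j]] else res) res) []
      = (PySem.List.enumerate nums1).foldl (fun res p => res ++ pvMatches nums2 p.1 p.2) [] := by
    rw [PySem.List.enumerate_eq_map_pyRange nums1 (0 : Int), List.foldl_map]
    apply PySem.List.foldl_congr_mem
    intro res x _
    exact innerA_eq nums2 x (PySem.List.pyGetD nums1 x 0) res
  have hB : (PySem.List.enumerate nums1).foldl (fun res p =>
      (((PySem.List.enumerate nums2).foldl
          (fun d p => d.modify p.2 ([] : List Int) (fun l => l ++ [p.1])) PySem.Dict.empty).getD p.2 []).foldl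
        (fun res j => res ++ [[p.2, p.1, j]]) res) []
      = (PySem.List.enumerate nums1).foldl (fun res p => res ++ pvMatches nums2 p.1 p.2) [] := by
    apply PySem.List.foldl_congr_mem
    intro res p _
    exact innerB_eq nums2 p.1 p.2 res
  exact hA.trans hB.symm
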